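-- pv_equiv track=rewrite | github.com/beheashta/CP104 | CP104/CP104 - Assignments/Assignments/atch7520_a08/src/a8_functions.py | find_frequent
-- ===== SOURCE A (Python) =====
-- def find_frequent(my_str):
--     """
--     -------------------------------------------------------
--     Finds all the non-whitespace characters within a string
--     that have the highest occurrence.
--
--     Use: characters = find_frequent(my_str)
--     -------------------------------------------------------
--     Parameters:
--         my_str: string that has to be checked
--
--     Returns
--         result: A list of characters that have the highest occurrence (list[integer], len() >= 0)
--     -------------------------------------------------------
--     """
--
--     if(len(my_str) > 0):
--         most_frequent = -1
--         for x in my_str: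
--             count = my_str.count(x)
--             if(x.isspace() == False and count > most_frequent):
--                 most_frequent = count
--
--             else:
--                 continue
--
--         result = []
--         for x in my_str:
--             if(x.isspace() == False and x not in result and my_str.count(x) == most_frequent):
--                 result.append(x)
--
--             else:
--                 continue
--
--     else:
--         result = None
--
--     return result
-- ===== SOURCE B (Python) =====
-- def find_frequent(my_str):
--     if len(my_str) == 0:
--         return None
--     freq = {}
--     for c in my_str:
--         if not c.isspace():
--             freq[c] = freq.get(c, 0) + 1
--     most = max(freq.values(), default=-1)
--     return [c for c, n in freq.items() if n == most]
-- ===== Notes on version B (the rewrite author's own statement) =====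
-- stated objective: faster
-- what changed: A rescans the whole string with my_str.count for every character (and runs a separate max-tracking loop); B builds a frequency dict in one pass, takes one max over its values, and reads the answer off the dict's first-appearance key order.
import Mathlib
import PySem

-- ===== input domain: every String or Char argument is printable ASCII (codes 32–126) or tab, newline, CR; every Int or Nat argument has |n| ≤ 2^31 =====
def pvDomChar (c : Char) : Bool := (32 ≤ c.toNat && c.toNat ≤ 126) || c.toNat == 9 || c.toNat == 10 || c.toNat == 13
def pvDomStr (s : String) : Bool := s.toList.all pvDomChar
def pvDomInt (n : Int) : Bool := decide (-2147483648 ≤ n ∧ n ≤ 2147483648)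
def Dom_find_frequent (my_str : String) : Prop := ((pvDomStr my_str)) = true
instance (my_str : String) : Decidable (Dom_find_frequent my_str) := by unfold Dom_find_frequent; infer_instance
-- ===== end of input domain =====

-- B replaces A's quadratic repeated my_str.count scans by one frequency dict built in a
-- single pass (keys in first-appearance order), then one max and one comprehension: faster by
-- the asymptotic change O(n^2) → O(n·k).

-- ===== PORT A =====
def find_frequent (my_str : String) : Option (List String) :=
  let l := my_str.toList
  if l.length > 0 then
    let most : Int := l.foldl (fun mf x =>
      let count : Int := (l.count x : Int)
      if PySem.Chars.isspace x = false ∧ count > mf then count else mf) (-1)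
    let result : List String := l.foldl (fun res x =>
      if PySem.Chars.isspace x = false ∧ String.ofList [x] ∉ res ∧ (l.count x : Int) = most
      then res ++ [String.ofList [x]] else res) []
    some result
  else none

-- ===== PORT B =====
def find_frequent_alt (my_str : String) : Option (List String) :=
  let l := my_str.toList
  if l.length = 0 then none
  else
    let freq : PySem.Dict Char Int := l.foldl (fun d c =>
      if PySem.Chars.isspace c = true then d else d.insert c (d.getD c 0 + 1)) PySem.Dict.empty
    let most : Int := (PySem.List.max? freq.values (fun v => v)).getD (-1)
    some ((freq.items.filter (fun p => p.2 = most)).map (fun p => String.ofList [p.1]))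

-- ===== PRECONDITION & SPEC =====
def Spec_find_frequent (my_str : String) (out : Option (List String)) : Prop := out = find_frequent_alt my_str
instance (my_str : String) (out : Option (List String)) : Decidable (Spec_find_frequent my_str out) := by unfold Spec_find_frequent; infer_instance

-- ===== CLAIM (what is proved, stated in full; the proofs are below) =====
def Claim_equal_find_frequent : Prop := ∀ (my_str : String), Dom_find_frequent my_str → Spec_find_frequent my_str (find_frequent my_str)

-- ===== LEMMAS AND PROOFS =====

-- skip-or-act folds are folds over the filtered list
theorem pv_foldl_filter_if {α β : Type} (p : α → Bool) (f : β → α → β) :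
    ∀ (l : List α) (b : β),
      l.foldl (fun b x => if p x then f b x else b) b = (l.filter p).foldl f b := by
  intro l
  induction l with
  | nil => intro b; rfl
  | cons x xs ih =>
    intro b
    by_cases hx : p x = true
    · simp [hx, ih]
    · simp [hx, ih]

-- running-max facts
theorem pv_le_foldl_max : ∀ (xs : List Int) (a : Int), a ≤ xs.foldl max a := by
  intro xs
  induction xs with
  | nil => intro a; simp
  | cons x xs ih =>
    intro a
    simpa using le_trans (le_max_left a x) (ih (max a x))

theorem pv_mem_le_foldl_max : ∀ (xs : List Int) (a x : Int), x ∈ xs → x ≤ xs.foldl max a := by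
  intro xs
  induction xs with
  | nil => intro a x hx; simp at hx
  | cons y ys ih =>
    intro a x hx
    rcases List.mem_cons.mp hx with h | h
    · subst h; simpa using le_trans (le_max_right a x) (pv_le_foldl_max ys (max a x))
    · simpa using ih (max a y) x h

theorem pv_foldl_max_le : ∀ (xs : List Int) (a b : Int), a ≤ b → (∀ x ∈ xs, x ≤ b) → xs.foldl max a ≤ b := by
  intro xs
  induction xs with
  | nil => intro a b hab _; simpa using hab
  | cons x xs ih =>
    intro a b hab hxs
    simpa using ih (max a x) b (max_le hab (hxs x (by simp))) (fun y hy => hxs y (by simp [hy]))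

theorem pv_foldl_max_eq_of_mem_iff (xs ys : List Int) (a : Int)
    (h : ∀ x, x ∈ xs ↔ x ∈ ys) : xs.foldl max a = ys.foldl max a := by
  apply le_antisymm
  · exact pv_foldl_max_le xs a _ (pv_le_foldl_max ys a)
      (fun x hx => pv_mem_le_foldl_max ys a x ((h x).mp hx))
  · exact pv_foldl_max_le ys a _ (pv_le_foldl_max xs a)
      (fun x hx => pv_mem_le_foldl_max xs a x ((h x).mpr hx))

-- max(v, default=-1) as a running max, when every element is ≥ -1
theorem pv_maxD_eq (v : List Int) (h : ∀ x ∈ v, (-1 : Int) ≤ x) :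
    (PySem.List.max? v (fun y => y)).getD (-1) = v.foldl max (-1) := by
  cases v with
  | nil => rfl
  | cons x t =>
    rw [PySem.List.max?_id_cons]
    simp [max_eq_right (h x (by simp))]

-- first-occurrence dedup, recursively
def pvD : List Char → List Char
  | [] => []
  | x :: xs => x :: pvD (xs.filter (fun y => y ≠ x))
termination_by l => l.length
decreasing_by
  have h := List.length_filter_le (fun y : {y // y ∈ xs} => !decide (y.1 = x)) xs.attach
  simp only [List.length_attach] at h
  simpa using Nat.lt_succ_of_le h

theorem pvD_filter (r : Char → Bool) :
    ∀ (n : Nat) (m : List Char), m.length ≤ n → pvD (m.filter r) = (pvD m).filter r := by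
  intro n
  induction n with
  | zero =>
    intro m hm
    have : m = [] := List.eq_nil_of_length_eq_zero (Nat.le_zero.mp hm)
    subst this; simp [pvD]
  | succ n ih =>
    intro m hm
    cases m with
    | nil => simp [pvD]
    | cons x xs =>
      by_cases hx : r x = true
      · rw [List.filter_cons_of_pos hx]
        rw [show pvD (x :: xs.filter r) = x :: pvD ((xs.filter r).filter (fun y => y ≠ x)) from by simp [pvD]]
        rw [show pvD (x :: xs) = x :: pvD (xs.filter (fun y => y ≠ x)) from by simp [pvD]]
        rw [List.filter_cons_of_pos hx]
        congr 1
        rw [List.filter_filter, ← ih _ (le_trans (List.length_filter_le _ _) (Nat.le_of_succ_le_succ hm)),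
          List.filter_filter]
        exact congrArg pvD (List.filter_congr (fun y _ => Bool.and_comm _ _))
      · rw [List.filter_cons_of_neg hx]
        rw [show pvD (x :: xs) = x :: pvD (xs.filter (fun y => y ≠ x)) from by simp [pvD]]
        rw [List.filter_cons_of_neg hx]
        have h1 : xs.filter r = (xs.filter (fun y => decide (y ≠ x))).filter r := by
          rw [List.filter_filter]
          refine (List.filter_congr (fun y _ => ?_)).symm
          by_cases hyx : y = x
          · subst hyx; simp [hx]
          · simp [hyx]
        rw [h1, ih _ (le_trans (List.length_filter_le _ _) (Nat.le_of_succ_le_succ hm))]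

-- the "append if unseen" fold in closed form
theorem pv_foldl_add_closed :
    ∀ (m acc : List Char), m.foldl PySem.Set.add acc = acc ++ pvD (m.filter (fun x => !acc.contains x)) := by
  intro m
  induction m with
  | nil => intro acc; simp [pvD.eq_1]
  | cons x xs ih =>
    intro acc
    by_cases hx : acc.contains x = true
    · have hxm : x ∈ acc := List.contains_iff_mem.mp hx
      rw [List.foldl_cons]
      have : PySem.Set.add acc x = acc := by simp [PySem.Set.add, hxm]
      rw [this, ih, List.filter_cons_of_neg (by simp [hxm])]
    · have hxm : x ∉ acc := fun h => hx (List.contains_iff_mem.mpr h)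
      rw [List.foldl_cons]
      have hstep : PySem.Set.add acc x = acc ++ [x] := by simp [PySem.Set.add, hxm]
      rw [hstep, ih, List.filter_cons_of_pos (by simp [hxm])]
      have hpv : pvD (x :: xs.filter (fun y => !acc.contains y))
          = x :: pvD ((xs.filter (fun y => !acc.contains y)).filter (fun y => y ≠ x)) := by
        simp [pvD]
      rw [hpv, List.filter_filter, List.append_assoc, List.singleton_append]
      congr 2
      refine congrArg pvD (List.filter_congr (fun y _ => ?_))
      by_cases hyx : y = x
      · subst hyx; simp
      · simp [hyx]

theorem pv_ofList_eq_pvD (m : List Char) : PySem.Set.ofList m = pvD m := by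
  have := pv_foldl_add_closed m []
  simpa [PySem.Set.ofList, PySem.Set.empty] using this

-- the string-level dedup fold is the char-level one, mapped
theorem pv_foldl_dedup_map :
    ∀ (m seen : List Char),
      m.foldl (fun (res : List String) x =>
          if String.ofList [x] ∉ res then res ++ [String.ofList [x]] else res)
        (seen.map (fun c => String.ofList [c]))
      = (m.foldl PySem.Set.add seen).map (fun c => String.ofList [c]) := by
  intro m
  induction m with
  | nil => intro seen; rfl
  | cons x xs ih =>
    intro seen
    have hmem : (String.ofList [x] ∈ seen.map (fun c => String.ofList [c])) ↔ x ∈ seen := by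
      constructor
      · intro h
        rcases List.mem_map.mp h with ⟨c, hc, hce⟩
        have hcx : c = x := by simpa using String.ofList_inj.mp hce
        exact hcx ▸ hc
      · intro h; exact List.mem_map.mpr ⟨x, h, rfl⟩
    by_cases hx : x ∈ seen
    · rw [List.foldl_cons, if_neg (fun hcon => hcon (hmem.mpr hx))]
      have : PySem.Set.add seen x = seen := by
        simp [PySem.Set.add, hx]
      rw [List.foldl_cons, this, ih]
    · rw [List.foldl_cons, if_pos (fun hcon => hx (hmem.mp hcon))]
      have hadd : PySem.Set.add seen x = seen ++ [x] := by
        simp [PySem.Set.add, hx]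
      rw [List.foldl_cons, hadd, ← ih]
      simp

theorem find_frequent_eq (my_str : String) :
    find_frequent my_str = find_frequent_alt my_str := by
  unfold find_frequent find_frequent_alt
  set l := my_str.toList with hl
  by_cases hlen : l.length = 0
  · simp [hlen]
  · have hpos : l.length > 0 := Nat.pos_of_ne_zero hlen
    simp only [if_pos hpos, if_neg hlen]
    -- notation
    set cnt : Char → Int := fun x => (l.count x : Int) with hcnt
    set ns : List Char := l.filter (fun c => !PySem.Chars.isspace c) with hns
    -- A's first loop is a running max over counts of non-space chars
    have hmostA :
        l.foldl (fun mf x =>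
            let count : Int := (l.count x : Int)
            if PySem.Chars.isspace x = false ∧ count > mf then count else mf) (-1)
          = (ns.map cnt).foldl max (-1) := by
      rw [List.foldl_ext
        (g := fun mf x => if (!PySem.Chars.isspace x : Bool) then max mf (cnt x) else mf)
        _ _ (by
          intro a x _
          simp only [hcnt]
          by_cases hs : PySem.Chars.isspace x = true
          · simp [hs]
          · have hs' : PySem.Chars.isspace x = false := by simpa using hs
            simp [hs', max_def]
            split_ifs <;> omega)]
      rw [pv_foldl_filter_if (fun x => !PySem.Chars.isspace x) (fun mf x => max mf (cnt x)) l (-1)]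
      rw [← hns, ← List.foldl_map]
    -- B's freq dict is the counter of ns
    have hfreq :
        l.foldl (fun d c =>
            if PySem.Chars.isspace c = true then d else d.insert c (d.getD c 0 + 1))
          PySem.Dict.empty = PySem.Dict.counter ns := by
      rw [List.foldl_ext
        (g := fun d c => if (!PySem.Chars.isspace c : Bool) then d.insert c (d.getD c 0 + 1) else d)
        _ _ (by intro d c _; by_cases hs : PySem.Chars.isspace c = true <;> simp [hs])]
      rw [pv_foldl_filter_if (fun c => !PySem.Chars.isspace c)
        (fun (d : PySem.Dict Char Int) c => d.insert c (d.getD c 0 + 1)) l PySem.Dict.empty, ← hns]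
      exact PySem.Dict.foldl_insert_getD_add_one_eq_counter ns
    rw [hfreq, hmostA]
    -- counts agree on ns (and hence on its dedup)
    have hcnt_ns : ∀ k ∈ ns, cnt k = (ns.count k : Int) := by
      intro k hk
      have hk2 : k ∈ l.filter (fun c => !PySem.Chars.isspace c) := hns ▸ hk
      have hkp : (fun c => !PySem.Chars.isspace c) k = true := by
        simpa using (List.mem_filter.mp hk2).2
      simp only [hcnt, hns]
      rw [List.count_filter (p := fun c => !PySem.Chars.isspace c) (a := k) (l := l) hkp]
    -- B's most is the same running max
    have hvals : (PySem.Dict.counter ns).values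
        = (PySem.Set.ofList ns).map (fun k => (ns.count k : Int)) := by
      simp [PySem.Dict.values, PySem.Dict.items_counter]
    have hmostB :
        ((PySem.List.max? (PySem.Dict.counter ns).values (fun v => v)).getD (-1))
          = (ns.map cnt).foldl max (-1) := by
      rw [hvals, pv_maxD_eq _ (by
        intro x hx
        rcases List.mem_map.mp hx with ⟨k, _, hke⟩
        have : (0 : Int) ≤ x := hke ▸ Int.natCast_nonneg _
        omega)]
      apply pv_foldl_max_eq_of_mem_iff
      intro x
      constructor
      · intro hx
        rcases List.mem_map.mp hx with ⟨k, hk, hke⟩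
        have hk' : k ∈ ns := (PySem.Set.mem_ofList ns k).mp hk
        exact List.mem_map.mpr ⟨k, hk', by rw [← hke]; exact hcnt_ns k hk'⟩
      · intro hx
        rcases List.mem_map.mp hx with ⟨k, hk, hke⟩
        exact List.mem_map.mpr ⟨k, (PySem.Set.mem_ofList ns k).mpr hk,
          by rw [← hke]; exact (hcnt_ns k hk).symm⟩
    rw [hmostB]
    set most : Int := (ns.map cnt).foldl max (-1) with hmost
    -- both result lists
    congr 1
    -- A's second loop
    have hA :
        l.foldl (fun res x =>
            if PySem.Chars.isspace x = false ∧ String.ofList [x] ∉ res ∧ cnt x = most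
            then res ++ [String.ofList [x]] else res) []
          = ((PySem.Set.ofList ns).filter (fun k => decide (cnt k = most))).map
              (fun c => String.ofList [c]) := by
      rw [List.foldl_ext
        (g := fun res x => if (!PySem.Chars.isspace x && decide (cnt x = most) : Bool)
            then (if String.ofList [x] ∉ res then res ++ [String.ofList [x]] else res) else res)
        _ _ (by
          intro res x _
          by_cases hs : PySem.Chars.isspace x = true
          · simp [hs]
          · have hs' : PySem.Chars.isspace x = false := by simpa using hs
            by_cases hm : cnt x = most
            · by_cases hin : String.ofList [x] ∈ res <;> simp [hs', hm, hin]
            · simp [hs', hm])]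
      rw [pv_foldl_filter_if (fun x => !PySem.Chars.isspace x && decide (cnt x = most))
        (fun (res : List String) x => if String.ofList [x] ∉ res then res ++ [String.ofList [x]] else res) l []]
      have hfl : l.filter (fun x => !PySem.Chars.isspace x && decide (cnt x = most))
          = ns.filter (fun k => decide (cnt k = most)) := by
        rw [hns, List.filter_filter]
        exact List.filter_congr (fun y _ => by rw [Bool.and_comm])
      rw [hfl]
      have := pv_foldl_dedup_map (ns.filter (fun k => decide (cnt k = most))) []
      simp only [List.map_nil] at this
      rw [this, pv_foldl_add_closed, List.nil_append]
      rw [List.filter_congr (q := fun _ => true) (fun y _ => by simp), List.filter_true]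
      rw [pvD_filter _ ns.length ns le_rfl, ← pv_ofList_eq_pvD]
    rw [hA]
    -- B's comprehension over freq.items
    rw [PySem.Dict.items_counter, List.filter_map, List.map_map]
    rw [List.filter_congr
      (p := (fun p => decide (p.2 = most)) ∘ (fun k => (k, (List.count k ns : Int))))
      (q := fun k => decide (cnt k = most)) (fun y hy => by
        have hy' : y ∈ ns := (PySem.Set.mem_ofList ns y).mp hy
        simp [Function.comp, hcnt_ns y hy'])]
    rfl

-- ===== VERDICT (by name: the statement is the Claim_ definition above) =====
theorem find_frequent_spec : Claim_equal_find_frequent := by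
  intro my_str _
  unfold Spec_find_frequent
  exact find_frequent_eq my_str
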